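-- pv_equiv track=rewrite | github.com/farausch/xbrl-distant-supervision | data_augmentation.py | replace_entities
-- ===== SOURCE A (Python) =====
-- def is_number(string):
--     string = string.replace(".", "").replace(",", ".")
--     try:
--         float(string)
--         return True
--     except ValueError:
--         return False
--
-- def replace_entities(token_arr_freeze, annotation_arr_freeze, old_entity, new_entity, new_string):
--     token_arr = [token for token in token_arr_freeze]
--     annotation_arr = [annotation for annotation in annotation_arr_freeze]
--     new_tokens = []
--     new_annotations = []
--     k = 0
--     while k < len(token_arr) - 1:
--         if annotation_arr[k] == old_entity and annotation_arr[k + 1] == old_entity: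
--             del annotation_arr[k]
--             del token_arr[k]
--         else:
--             k += 1
--     for i in range(len(token_arr)):
--         if annotation_arr[i] == old_entity:
--             if not is_number(token_arr[i]):
--                 for j in range(len(new_string.split(" "))):
--                     new_tokens.append(new_string.split(" ")[j])
--                     new_annotations.append(new_entity)
--             else:
--                 new_tokens.append(token_arr[i])
--                 new_annotations.append(new_entity)
--         else:
--             new_tokens.append(token_arr[i])
--             new_annotations.append(annotation_arr[i])
--     return new_tokens, new_annotations
-- ===== SOURCE B (Python) =====
-- def _is_number(string):
--     string = string.replace(".", "").replace(",", ".")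
--     try:
--         float(string)
--         return True
--     except ValueError:
--         return False
--
-- def replace_entities(token_arr_freeze, annotation_arr_freeze, old_entity, new_entity, new_string):
--     # Single pass over the zipped pairs: remember only the LAST token of the
--     # current run of old_entity annotations; flush a substitution when the run ends.
--     new_tokens = []
--     new_annotations = []
--     in_run = False
--     last_tok = ""
--
--     def flush():
--         if _is_number(last_tok):
--             new_tokens.append(last_tok)
--             new_annotations.append(new_entity)
--         else:
--             parts = new_string.split(" ")
--             new_tokens.extend(parts)
--             new_annotations.extend([new_entity] * len(parts))
--
--     for tok, ann in zip(token_arr_freeze, annotation_arr_freeze):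
--         if ann == old_entity:
--             in_run = True
--             last_tok = tok
--         else:
--             if in_run:
--                 flush()
--                 in_run = False
--             new_tokens.append(tok)
--             new_annotations.append(ann)
--     if in_run:
--         flush()
--     return new_tokens, new_annotations
-- ===== Notes on version B (the rewrite author's own statement) =====
-- stated objective: alternative
-- what changed: B replaces A's two phases (repeated in-place deletion of adjacent old-entity annotation duplicates, then an indexed substitution pass with repeated new_string.split calls) by a single pass over the zipped token/annotation pairs that tracks only the last token of the current old-entity run and flushes one substitution when the run ends.
import Mathlib
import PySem

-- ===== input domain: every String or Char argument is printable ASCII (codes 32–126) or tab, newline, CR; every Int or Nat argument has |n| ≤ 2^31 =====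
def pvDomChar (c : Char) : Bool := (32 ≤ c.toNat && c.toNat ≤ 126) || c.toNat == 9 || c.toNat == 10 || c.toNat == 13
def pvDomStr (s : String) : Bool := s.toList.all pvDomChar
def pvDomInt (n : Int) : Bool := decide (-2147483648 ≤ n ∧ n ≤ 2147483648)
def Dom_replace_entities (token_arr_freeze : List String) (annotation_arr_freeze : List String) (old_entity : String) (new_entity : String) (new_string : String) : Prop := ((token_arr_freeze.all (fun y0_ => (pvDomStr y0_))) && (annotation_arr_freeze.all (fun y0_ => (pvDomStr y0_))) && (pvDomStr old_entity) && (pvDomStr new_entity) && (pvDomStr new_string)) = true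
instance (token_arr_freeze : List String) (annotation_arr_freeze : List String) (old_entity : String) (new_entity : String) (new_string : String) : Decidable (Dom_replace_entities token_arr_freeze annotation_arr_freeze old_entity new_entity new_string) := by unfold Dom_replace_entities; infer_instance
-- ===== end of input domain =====

-- B replaces A's two-phase pass (in-place deletion of adjacent old-entity duplicates, then an
-- indexed substitution pass) by one pass over the zipped pairs that keeps only the last token of
-- the current old-entity run (objective: alternative — a single fused pass, no in-place deletions).

-- ===== PORT A =====
-- is_number: float-literal recognition; only the ValueError/success outcome of float() matters,
-- so the port is a recognizer of CPython's float-literal grammar (exact on the ASCII domain).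
def pvIsWS (c : Char) : Bool := c == ' ' || c == '\t' || c == '\n' || c == '\r' || c.toNat == 11 || c.toNat == 12

-- digit run with single underscores strictly between digits (rest after a leading digit)
def pvDigitsRest : List Char → Bool
  | [] => true
  | ['_'] => false
  | '_' :: d :: rs => d.isDigit && pvDigitsRest rs
  | c :: rest => c.isDigit && pvDigitsRest rest

def pvDigitPart : List Char → Bool
  | [] => false
  | c :: rest => c.isDigit && pvDigitsRest rest

def pvDropSign : List Char → List Char
  | [] => []
  | c :: rest => if c = '+' || c = '-' then rest else c :: rest

def pvMantissa (m : List Char) : Bool :=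
  if m.contains '.' then
    let left := m.takeWhile (· != '.')
    let right := (m.dropWhile (· != '.')).tail
    (pvDigitPart left && (right.isEmpty || pvDigitPart right)) || (left.isEmpty && pvDigitPart right)
  else pvDigitPart m

def pvFloatOk (l0 : List Char) : Bool :=
  let l1 := ((l0.dropWhile pvIsWS).reverse.dropWhile pvIsWS).reverse
  let l2 := (pvDropSign l1).map PySem.Chars.lowerChar
  if l2 = "inf".toList || l2 = "infinity".toList || l2 = "nan".toList then true
  else if l2.contains 'e' then
    let m := l2.takeWhile (· != 'e')
    let e := pvDropSign ((l2.dropWhile (· != 'e')).tail)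
    pvMantissa m && pvDigitPart e
  else pvMantissa l2

-- is_number(string): replace "." by "", "," by ".", then try float(...)
def pvIsNumber (s : String) : Bool :=
  pvFloatOk (PySem.Str.replace (PySem.Str.replace s "." "") "," ".").toList

-- new_string.split(" ") (separator " " is non-empty, so split? always returns a value)
def pvSplitSpace (s : String) : List String := (PySem.Str.split? s " ").getD []

-- A's while loop: del annotation_arr[k]; del token_arr[k] while two adjacent old_entity annotations
def pvCollapse (old : String) (tok ann : List String) (k : Nat) : List String × List String :=
  if h : k + 1 < tok.length then
    if ann.getD k "" == old && ann.getD (k + 1) "" == old then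
      pvCollapse old (tok.eraseIdx k) (ann.eraseIdx k) k
    else
      pvCollapse old tok ann (k + 1)
  else
    (tok, ann)
termination_by tok.length - k
decreasing_by
  · have hk : k < tok.length := by omega
    simp [List.length_eraseIdx, hk]; omega
  · omega

def replace_entities (token_arr_freeze : List String) (annotation_arr_freeze : List String) (old_entity : String) (new_entity : String) (new_string : String) : List String × List String :=
  let p := pvCollapse old_entity token_arr_freeze annotation_arr_freeze 0
  let token_arr := p.1
  let annotation_arr := p.2
  (PySem.List.pyRange 0 (token_arr.length : Int) 1).foldl
    (fun acc i =>
      if PySem.List.pyGetD annotation_arr i "" == old_entity then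
        if !pvIsNumber (PySem.List.pyGetD token_arr i "") then
          (PySem.List.pyRange 0 ((pvSplitSpace new_string).length : Int) 1).foldl
            (fun acc2 j =>
              (acc2.1 ++ [PySem.List.pyGetD (pvSplitSpace new_string) j ""],
               acc2.2 ++ [new_entity])) acc
        else
          (acc.1 ++ [PySem.List.pyGetD token_arr i ""], acc.2 ++ [new_entity])
      else
        (acc.1 ++ [PySem.List.pyGetD token_arr i ""], acc.2 ++ [PySem.List.pyGetD annotation_arr i ""]))
    ([], [])

-- ===== PORT B =====
def pvFlush (new ns : String) (outT outA : List String) (lastTok : String) : List String × List String :=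
  if pvIsNumber lastTok then (outT ++ [lastTok], outA ++ [new])
  else
    let parts := pvSplitSpace ns
    (outT ++ parts, outA ++ List.replicate parts.length new)

def pvAltGo (old new ns : String) : List (String × String) → List String → List String → Bool → String → List String × List String
  | [], outT, outA, inRun, lastTok =>
      if inRun then pvFlush new ns outT outA lastTok else (outT, outA)
  | (t, a) :: rest, outT, outA, inRun, lastTok =>
      if a == old then pvAltGo old new ns rest outT outA true t
      else
        let p := if inRun then pvFlush new ns outT outA lastTok else (outT, outA)
        pvAltGo old new ns rest (p.1 ++ [t]) (p.2 ++ [a]) false lastTok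

def replace_entities_alt (token_arr_freeze : List String) (annotation_arr_freeze : List String) (old_entity : String) (new_entity : String) (new_string : String) : List String × List String :=
  pvAltGo old_entity new_entity new_string (token_arr_freeze.zip annotation_arr_freeze) [] [] false ""

-- ===== PRECONDITION & SPEC =====
-- Pre_ excludes exactly the inputs on which A raises IndexError: whenever the annotation list is
-- shorter than the token list, A's index k (or k+1) runs past annotation_arr and Python raises.
def Pre_replace_entities (token_arr_freeze : List String) (annotation_arr_freeze : List String) (old_entity : String) (new_entity : String) (new_string : String) : Prop :=
  token_arr_freeze.length ≤ annotation_arr_freeze.length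
instance (token_arr_freeze : List String) (annotation_arr_freeze : List String) (old_entity : String) (new_entity : String) (new_string : String) : Decidable (Pre_replace_entities token_arr_freeze annotation_arr_freeze old_entity new_entity new_string) := by unfold Pre_replace_entities; infer_instance

def pvWitness_replace_entities : List String × List String × String × String × String :=
  (["Acme", "Corp", "5"], ["E", "E", "O"], "E", "N", "some company")

def Spec_replace_entities (token_arr_freeze : List String) (annotation_arr_freeze : List String) (old_entity : String) (new_entity : String) (new_string : String) (out : List String × List String) : Prop := out = replace_entities_alt token_arr_freeze annotation_arr_freeze old_entity new_entity new_string
instance (token_arr_freeze : List String) (annotation_arr_freeze : List String) (old_entity : String) (new_entity : String) (new_string : String) (out : List String × List String) : Decidable (Spec_replace_entities token_arr_freeze annotation_arr_freeze old_entity new_entity new_string out) := by unfold Spec_replace_entities; infer_instance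

-- ===== CLAIM (what is proved, stated in full; the proofs are below) =====
def Claim_equal_replace_entities : Prop := ∀ (token_arr_freeze : List String) (annotation_arr_freeze : List String) (old_entity : String) (new_entity : String) (new_string : String), Dom_replace_entities token_arr_freeze annotation_arr_freeze old_entity new_entity new_string → Pre_replace_entities token_arr_freeze annotation_arr_freeze old_entity new_entity new_string → Spec_replace_entities token_arr_freeze annotation_arr_freeze old_entity new_entity new_string (replace_entities token_arr_freeze annotation_arr_freeze old_entity new_entity new_string)

-- ===== LEMMAS AND PROOFS =====

-- The collapsed pair list: in every maximal run of old-annotated pairs only the last survives.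
def colPairs (old : String) : List (String × String) → List (String × String)
  | (t1, a1) :: (t2, a2) :: rest =>
      if a1 == old && a2 == old then colPairs old ((t2, a2) :: rest)
      else (t1, a1) :: colPairs old ((t2, a2) :: rest)
  | l => l

-- One emission step of the substitution phase, on a pair.
def pvEmit (old new ns : String) (acc : List String × List String) (p : String × String) : List String × List String :=
  if p.2 == old then
    if !pvIsNumber p.1 then
      (acc.1 ++ pvSplitSpace ns,
       acc.2 ++ List.replicate (pvSplitSpace ns).length new)
    else (acc.1 ++ [p.1], acc.2 ++ [new])
  else (acc.1 ++ [p.1], acc.2 ++ [p.2])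

theorem pvColPairs_cons_cons (old : String) (t1 a1 t2 a2 : String) (rest : List (String × String)) :
    colPairs old ((t1, a1) :: (t2, a2) :: rest)
      = if a1 == old && a2 == old then colPairs old ((t2, a2) :: rest)
        else (t1, a1) :: colPairs old ((t2, a2) :: rest) := rfl

theorem pvColPairs_cons_ne (old t a : String) (l : List (String × String)) (h : (a == old) = false) :
    colPairs old ((t, a) :: l) = (t, a) :: colPairs old l := by
  cases l with
  | nil => rfl
  | cons q r => rcases q with ⟨t2, a2⟩; rw [pvColPairs_cons_cons]; simp [h]

theorem pvFoldl_pair_append (new : String) (parts : List String) :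
    ∀ acc : List String × List String,
      parts.foldl (fun acc2 p => (acc2.1 ++ [p], acc2.2 ++ [new])) acc
        = (acc.1 ++ parts, acc.2 ++ List.replicate parts.length new) := by
  induction parts with
  | nil => intro acc; simp
  | cons p ps ih => intro acc; simp [ih, List.replicate_succ]

theorem pvInner_eq (new : String) (parts : List String) (acc : List String × List String) :
    (PySem.List.pyRange 0 (parts.length : Int) 1).foldl
        (fun acc2 j => (acc2.1 ++ [PySem.List.pyGetD parts j ""], acc2.2 ++ [new])) acc
      = (acc.1 ++ parts, acc.2 ++ List.replicate parts.length new) := by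
  rw [PySem.List.foldl_pyRange_zero_pyGetD' parts ""
        (fun acc2 p => (acc2.1 ++ [p], acc2.2 ++ [new])) acc]
  exact pvFoldl_pair_append new parts acc

theorem pvCollapse_spec (old : String) (tok ann : List String) (k : Nat) :
    tok.length ≤ ann.length → k ≤ tok.length →
    pvCollapse old tok ann k =
      (tok.take k ++ (colPairs old ((tok.drop k).zip (ann.drop k))).map Prod.fst,
       ann.take k ++ (colPairs old ((tok.drop k).zip (ann.drop k))).map Prod.snd
         ++ ann.drop tok.length) := by
  induction tok, ann, k using pvCollapse.induct old with
  | case1 tok ann k h hc ih =>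
    intro hlen hk
    have hkt : k < tok.length := by omega
    have hka : k < ann.length := by omega
    have hk1a : k + 1 < ann.length := by omega
    rw [pvCollapse, dif_pos h, if_pos hc]
    have hTlen : (List.take k tok).length = k := by simp; omega
    have hALen : (List.take k ann).length = k := by simp; omega
    have hlen' : (tok.eraseIdx k).length ≤ (ann.eraseIdx k).length := by
      simp [List.length_eraseIdx, hkt, hka]; omega
    have hk' : k ≤ (tok.eraseIdx k).length := by
      simp [List.length_eraseIdx, hkt]; omega
    rw [ih hlen' hk']
    have htk := List.eraseIdx_eq_take_drop_succ tok k
    have hak := List.eraseIdx_eq_take_drop_succ ann k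
    have e1 : (tok.eraseIdx k).take k = tok.take k := by
      rw [htk, List.take_append, hTlen]; simp
    have e2 : (ann.eraseIdx k).take k = ann.take k := by
      rw [hak, List.take_append, hALen]; simp
    have e3 : (tok.eraseIdx k).drop k = tok.drop (k + 1) := by
      rw [htk, List.drop_append, hTlen]; simp
    have e4 : (ann.eraseIdx k).drop k = ann.drop (k + 1) := by
      rw [hak, List.drop_append, hALen]; simp
    have e5 : (ann.eraseIdx k).drop ((tok.eraseIdx k).length) = ann.drop tok.length := by
      rw [hak]
      have hL : (tok.eraseIdx k).length = tok.length - 1 := by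
        simp [List.length_eraseIdx, hkt]
      rw [hL, List.drop_append, List.drop_drop]
      have : (List.take k ann).drop (tok.length - 1) = [] :=
        List.drop_eq_nil_of_le (by simp; omega)
      rw [this]
      simp only [List.nil_append]
      congr 1
      omega
    have ecol : colPairs old ((tok.drop k).zip (ann.drop k))
        = colPairs old ((tok.drop (k + 1)).zip (ann.drop (k + 1))) := by
      rw [List.drop_eq_getElem_cons hkt, List.drop_eq_getElem_cons hka,
        List.drop_eq_getElem_cons h, List.drop_eq_getElem_cons hk1a,
        List.zip_cons_cons, List.zip_cons_cons, pvColPairs_cons_cons]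
      rw [if_pos (by
        rw [List.getD_eq_getElem ann "" hka, List.getD_eq_getElem ann "" hk1a] at hc
        exact hc)]
    rw [e1, e2, e3, e4, e5, ecol]
  | case2 tok ann k h hc ih =>
    intro hlen hk
    have hkt : k < tok.length := by omega
    have hka : k < ann.length := by omega
    have hk1a : k + 1 < ann.length := by omega
    rw [pvCollapse, dif_pos h, if_neg hc]
    rw [ih hlen (by omega)]
    have e1 : tok.take (k + 1) = tok.take k ++ [tok[k]] := by
      rw [List.take_succ, List.getElem?_eq_getElem hkt]; rfl
    have e2 : ann.take (k + 1) = ann.take k ++ [ann[k]] := by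
      rw [List.take_succ, List.getElem?_eq_getElem hka]; rfl
    have ecol : colPairs old ((tok.drop k).zip (ann.drop k))
        = (tok[k], ann[k]) :: colPairs old ((tok.drop (k + 1)).zip (ann.drop (k + 1))) := by
      rw [List.drop_eq_getElem_cons hkt, List.drop_eq_getElem_cons hka,
        List.drop_eq_getElem_cons h, List.drop_eq_getElem_cons hk1a,
        List.zip_cons_cons, List.zip_cons_cons, pvColPairs_cons_cons]
      rw [if_neg (by
        rw [List.getD_eq_getElem ann "" hka, List.getD_eq_getElem ann "" hk1a] at hc
        exact hc)]
    rw [ecol, e1, e2]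
    simp only [List.map_cons, List.append_assoc, List.cons_append, List.nil_append]
  | case3 tok ann k h =>
    intro hlen hk
    rw [pvCollapse, dif_neg h]
    rcases (by omega : k = tok.length ∨ k + 1 = tok.length) with he | he
    · subst he
      simp [List.drop_length, colPairs, List.take_append_drop,
        List.take_of_length_le (le_refl tok.length)]
    · have hkt : k < tok.length := by omega
      have hka : k < ann.length := by omega
      have d1 : tok.drop k = [tok[k]] := by
        rw [List.drop_eq_getElem_cons hkt, he, List.drop_length]
      have d2 : ann.drop k = ann[k] :: ann.drop (k + 1) := List.drop_eq_getElem_cons hka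
      rw [d1, d2, List.zip_cons_cons, List.zip_nil_left]
      have hcp : colPairs old [(tok[k], ann[k])] = [(tok[k], ann[k])] := rfl
      rw [hcp]
      simp only [List.map_cons, List.map_nil, Prod.mk.injEq]
      refine ⟨?_, ?_⟩
      · conv_lhs => rw [← List.take_append_drop k tok]
        rw [d1]
      · conv_lhs => rw [← List.take_append_drop k ann]
        rw [d2, ← he]
        simp

theorem pvA_phase2 (tok ann : List String) (old new ns : String) (h : tok.length ≤ ann.length) :
    replace_entities tok ann old new ns
      = (colPairs old (tok.zip ann)).foldl (pvEmit old new ns) ([], []) := by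
  simp only [replace_entities]
  rw [pvCollapse_spec old tok ann 0 h (by omega)]
  simp only [List.take_zero, List.drop_zero, List.nil_append]
  set ps := colPairs old (tok.zip ann) with hps
  have hL : ((ps.map Prod.fst).length : Int) = (ps.length : Int) := by simp
  rw [hL]
  have hcg : ∀ (acc : List String × List String) (i : Int),
      i ∈ PySem.List.pyRange 0 (ps.length : Int) 1 →
      (if PySem.List.pyGetD (ps.map Prod.snd ++ ann.drop tok.length) i "" == old then
        if !pvIsNumber (PySem.List.pyGetD (ps.map Prod.fst) i "") then
          (PySem.List.pyRange 0 ((pvSplitSpace ns).length : Int) 1).foldl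
            (fun acc2 j =>
              (acc2.1 ++ [PySem.List.pyGetD (pvSplitSpace ns) j ""], acc2.2 ++ [new])) acc
        else
          (acc.1 ++ [PySem.List.pyGetD (ps.map Prod.fst) i ""], acc.2 ++ [new])
      else
        (acc.1 ++ [PySem.List.pyGetD (ps.map Prod.fst) i ""],
         acc.2 ++ [PySem.List.pyGetD (ps.map Prod.snd ++ ann.drop tok.length) i ""]))
      = pvEmit old new ns acc (PySem.List.pyGetD ps i ("", "")) := by
    intro acc i hi
    rw [PySem.List.mem_pyRange_one] at hi
    obtain ⟨j, rfl⟩ : ∃ j : Nat, i = (j : Int) := ⟨i.toNat, by omega⟩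
    have hj : j < ps.length := by omega
    have ha : PySem.List.pyGetD (ps.map Prod.fst) (j : Int) "" = ps[j].1 := by
      rw [PySem.List.pyGetD_natCast,
        List.getD_eq_getElem _ "" (by simpa using hj), List.getElem_map]
    have hb : PySem.List.pyGetD (ps.map Prod.snd ++ ann.drop tok.length) (j : Int) ""
        = ps[j].2 := by
      rw [PySem.List.pyGetD_natCast,
        List.getD_eq_getElem _ "" (by simp; omega),
        List.getElem_append_left (by simpa using hj), List.getElem_map]
    have hc : PySem.List.pyGetD ps (j : Int) ("", "") = ps[j] := by
      rw [PySem.List.pyGetD_natCast, List.getD_eq_getElem _ _ hj]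
    rw [ha, hb, hc]
    by_cases h2 : (ps[j].2 == old) = true <;>
      by_cases h1 : pvIsNumber ps[j].1 <;>
        simp [pvEmit, h2, h1, pvInner_eq]
  exact Eq.trans
    (PySem.List.foldl_congr_mem _ _
      (fun acc i => pvEmit old new ns acc (PySem.List.pyGetD ps i ("", ""))) ([], []) hcg)
    (PySem.List.foldl_pyRange_zero_pyGetD' ps ("", "") (pvEmit old new ns) ([], []))

theorem pvB_phase2 (old new ns : String) (pairs : List (String × String)) :
    ∀ (outT outA : List String) (inRun : Bool) (lastTok : String),
      pvAltGo old new ns pairs outT outA inRun lastTok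
        = (colPairs old (if inRun then (lastTok, old) :: pairs else pairs)).foldl
            (pvEmit old new ns) (outT, outA) := by
  induction pairs with
  | nil =>
    intro outT outA inRun lastTok
    cases inRun with
    | false => simp [pvAltGo, colPairs]
    | true =>
      rw [pvAltGo, if_pos rfl]
      show pvFlush new ns outT outA lastTok
          = List.foldl (pvEmit old new ns) (outT, outA) [(lastTok, old)]
      simp only [List.foldl_cons, List.foldl_nil]
      simp only [pvFlush, pvEmit, beq_self_eq_true, if_true]
      cases h : pvIsNumber lastTok <;> simp
  | cons p rest ih =>
    rcases p with ⟨t, a⟩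
    intro outT outA inRun lastTok
    by_cases ha : (a == old) = true
    · have haeq : a = old := by simpa using ha
      subst haeq
      rw [pvAltGo, if_pos ha, ih]
      cases inRun with
      | false => rfl
      | true =>
        simp only [if_true]
        rw [pvColPairs_cons_cons]
        simp
    · have ha' : (a == old) = false := by simpa using ha
      rw [pvAltGo, if_neg (by simp [ha'])]
      rw [ih]
      have hemit : ∀ acc : List String × List String,
          pvEmit old new ns acc (t, a) = (acc.1 ++ [t], acc.2 ++ [a]) := by
        intro acc; simp [pvEmit, ha']
      cases inRun with
      | false =>
        simp only [Bool.false_eq_true, if_false]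
        rw [pvColPairs_cons_ne old t a rest ha']
        simp only [List.foldl_cons, hemit]
      | true =>
        have hflush : pvEmit old new ns (outT, outA) (lastTok, old)
            = pvFlush new ns outT outA lastTok := by
          simp only [pvFlush, pvEmit, beq_self_eq_true, if_true]
          cases h : pvIsNumber lastTok <;> simp [h]
        simp only [Bool.false_eq_true, if_true, if_false]
        rw [pvColPairs_cons_cons,
          if_neg (by simp [ha'] : ¬((old == old && a == old) = true)),
          pvColPairs_cons_ne old t a rest ha']
        rw [List.foldl_cons, List.foldl_cons, hflush, hemit]

-- ===== VERDICT (by name: the statement is the Claim_ definition above) =====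
theorem replace_entities_spec : Claim_equal_replace_entities := by
  intro tok ann old new ns _hdom hpre
  unfold Spec_replace_entities
  rw [pvA_phase2 tok ann old new ns hpre]
  unfold replace_entities_alt
  rw [pvB_phase2]
  simp
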